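-- pv_equiv track=rewrite | github.com/jacob-leider/jl-abstract-algebra | poly/__init__.py | poly_sparse_to_dense
-- ===== SOURCE A (Python) =====
-- def poly_sparse_to_dense(sparse: dict[int, int]) -> list[int]:
--   """
--   Converts a sparse polynomial to a dense polynomial.
--
--   Args:
--     sparse (dict[int, int]): The sparse polynomial.
--
--   Returns:
--     dense (list[int]) The dense polynomial.
--   """
--   dense = []
--   for i in range(max(sparse.keys()) + 1):
--     if i in sparse:
--       dense.append(sparse[i])
--     else:
--       dense.append(0)
--   return dense
-- ===== SOURCE B (Python) =====
-- def poly_sparse_to_dense(sparse: dict[int, int]) -> list[int]: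
--   """
--   Converts a sparse polynomial to a dense polynomial.
--   """
--   n = max(sparse) + 1  # same ValueError on empty input as the original
--   dense = [0] * n
--   for k, v in sparse.items():
--     if 0 <= k:  # negative exponents are never read by the dense form
--       dense[k] = v
--   return dense
-- ===== Notes on version B (the rewrite author's own statement) =====
-- stated objective: faster
-- what changed: B scatters each (exponent, coefficient) pair into a preallocated [0]*(max+1) list instead of gathering degree-by-degree with a membership test and lookup per index; Pre_ excludes the empty dict, on which both raise ValueError in max, and association lists with duplicate keys, which cannot arise from a Python dict.
-- outside the precondition, e.g. on poly_sparse_to_dense({}): A raises ValueError, B raises ValueError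
import Mathlib
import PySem

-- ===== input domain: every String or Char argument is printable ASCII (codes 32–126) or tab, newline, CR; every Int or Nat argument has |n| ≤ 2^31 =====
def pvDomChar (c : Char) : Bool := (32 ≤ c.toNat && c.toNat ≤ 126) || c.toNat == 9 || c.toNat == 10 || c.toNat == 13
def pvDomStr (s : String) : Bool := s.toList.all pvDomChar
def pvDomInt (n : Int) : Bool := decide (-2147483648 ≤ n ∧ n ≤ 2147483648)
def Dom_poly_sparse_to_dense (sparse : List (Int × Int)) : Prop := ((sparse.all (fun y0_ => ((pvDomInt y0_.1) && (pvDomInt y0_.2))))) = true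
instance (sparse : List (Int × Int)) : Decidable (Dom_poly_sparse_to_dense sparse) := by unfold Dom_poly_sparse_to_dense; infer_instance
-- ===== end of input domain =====

-- B scatters the (exponent, coefficient) pairs into a preallocated zero list instead of
-- gathering degree-by-degree with a membership test and lookup (objective: faster; the
-- timing run measured a constant-factor speedup).

-- ===== PORT A =====
-- 'i in sparse' on the dict = key membership
def pyKeyIn (sparse : List (Int × Int)) (i : Int) : Bool := (sparse.map Prod.fst).contains i
-- 'sparse[i]' = first binding for i; the 0 default stands for Python's KeyError,
-- unreachable here: every call is guarded by pyKeyIn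
def pyKeyGet (sparse : List (Int × Int)) (i : Int) : Int :=
  match sparse.find? (fun kv => kv.1 == i) with
  | some kv => kv.2
  | none => 0

def poly_sparse_to_dense (sparse : List (Int × Int)) : List Int :=
  match PySem.List.max? (sparse.map Prod.fst) (fun x => x) with
  | none => []  -- max([]) raises ValueError; excluded by Pre_
  | some m =>
    (PySem.List.pyRange 0 (m + 1) 1).foldl
      (fun dense i =>
        if pyKeyIn sparse i then dense ++ [pyKeyGet sparse i]
        else dense ++ [0]) []

-- ===== PORT B =====
def poly_sparse_to_dense_alt (sparse : List (Int × Int)) : List Int :=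
  match PySem.List.max? (sparse.map Prod.fst) (fun x => x) with
  | none => []  -- max(sparse) raises ValueError; excluded by Pre_
  | some m =>
    sparse.foldl
      (fun dense kv => if 0 ≤ kv.1 then dense.set kv.1.toNat kv.2 else dense)
      (List.replicate (m + 1).toNat 0)

-- ===== PRECONDITION & SPEC =====
-- Pre_ excludes the empty dict, on which Python A raises ValueError (max of empty sequence),
-- and association lists with duplicate keys, which do not represent any Python dict.
def Pre_poly_sparse_to_dense (sparse : List (Int × Int)) : Prop :=
  sparse ≠ [] ∧ (sparse.map Prod.fst).Nodup
instance (sparse : List (Int × Int)) : Decidable (Pre_poly_sparse_to_dense sparse) := by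
  unfold Pre_poly_sparse_to_dense; infer_instance

def pvWitness_poly_sparse_to_dense : (List (Int × Int)) := [(2, 5), (0, 1)]

def Spec_poly_sparse_to_dense (sparse : List (Int × Int)) (out : List Int) : Prop := out = poly_sparse_to_dense_alt sparse
instance (sparse : List (Int × Int)) (out : List Int) : Decidable (Spec_poly_sparse_to_dense sparse out) := by unfold Spec_poly_sparse_to_dense; infer_instance

-- ===== CLAIM (what is proved, stated in full; the proofs are below) =====
def Claim_equal_poly_sparse_to_dense : Prop := ∀ (sparse : List (Int × Int)), Dom_poly_sparse_to_dense sparse → Pre_poly_sparse_to_dense sparse → Spec_poly_sparse_to_dense sparse (poly_sparse_to_dense sparse)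

-- ===== LEMMAS AND PROOFS =====

-- A's gather loop is a map over the degree range
lemma portA_eq_map (sparse : List (Int × Int)) (m : Int) :
    (PySem.List.pyRange 0 (m + 1) 1).foldl
      (fun dense i =>
        if pyKeyIn sparse i then dense ++ [pyKeyGet sparse i]
        else dense ++ [0]) [] =
    (List.range (m + 1).toNat).map
      (fun (k : Nat) => if pyKeyIn sparse (k : Int) then pyKeyGet sparse (k : Int) else 0) := by
  rw [show (fun (dense : List Int) (i : Int) =>
        if pyKeyIn sparse i then dense ++ [pyKeyGet sparse i] else dense ++ [0]) =
      (fun dense i => dense ++ [if pyKeyIn sparse i then pyKeyGet sparse i else 0]) from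
    funext fun d => funext fun i => by split <;> rfl]
  rw [PySem.List.foldl_append_singleton_eq_map, PySem.List.pyRange_one]
  simp [List.map_map, Function.comp_def]

-- B's scatter loop, read back elementwise: with Nodup keys the value at position j is
-- that of the unique pair whose key k is nonnegative with k.toNat = j, else untouched
lemma scatter_getElem? (sparse : List (Int × Int)) (dense : List Int) (j : Nat)
    (hnd : (sparse.map Prod.fst).Nodup) :
    (sparse.foldl (fun d kv => if 0 ≤ kv.1 then d.set kv.1.toNat kv.2 else d) dense)[j]? =
      match sparse.find? (fun kv => decide (0 ≤ kv.1) && (kv.1.toNat == j)) with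
      | some kv => if j < dense.length then some kv.2 else none
      | none => dense[j]? := by
  induction sparse generalizing dense with
  | nil => simp
  | cons kv rest ih =>
    simp only [List.map_cons, List.nodup_cons] at hnd
    obtain ⟨hk, hnd'⟩ := hnd
    simp only [List.foldl_cons, List.find?_cons]
    by_cases hp : (decide (0 ≤ kv.1) && (kv.1.toNat == j)) = true
    · have hp' := hp
      simp only [Bool.and_eq_true, decide_eq_true_eq, beq_iff_eq] at hp'
      obtain ⟨h0, hj⟩ := hp'
      have hfind : rest.find? (fun kv' => decide (0 ≤ kv'.1) && (kv'.1.toNat == j)) = none := by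
        rw [List.find?_eq_none]
        intro x hx
        simp only [Bool.and_eq_true, decide_eq_true_eq, beq_iff_eq, not_and]
        intro h0x hjx
        have hx1 : x.1 = kv.1 := by omega
        exact hk (hx1 ▸ List.mem_map_of_mem hx)
      simp only [hp, if_pos h0]
      rw [ih _ hnd', hfind, hj]
      by_cases hlt : j < dense.length
      · rw [List.getElem?_set_self']
        simp [hlt]
      · rw [List.getElem?_set_self']
        simp [hlt]
    · simp only [hp]
      by_cases h0 : 0 ≤ kv.1
      · have hj : kv.1.toNat ≠ j := by
          intro hj; exact hp (by simp [h0, hj])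
        rw [if_pos h0, ih _ hnd']
        have hlen : (dense.set kv.1.toNat kv.2).length = dense.length := List.length_set ..
        have hget : (dense.set kv.1.toNat kv.2)[j]? = dense[j]? := List.getElem?_set_ne hj
        rw [hlen, hget]
      · rw [if_neg h0, ih _ hnd']

-- A's per-index test '0 ≤ k and k.toNat = j' is exactly 'k = j' for a Nat index j
lemma pred_eq (j : Nat) :
    (fun kv' : Int × Int => kv'.1 == (j : Int)) =
    (fun kv' : Int × Int => decide (0 ≤ kv'.1) && (kv'.1.toNat == j)) :=
  funext fun kv' => by
    apply Bool.eq_iff_iff.mpr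
    simp only [beq_iff_eq, Bool.and_eq_true, decide_eq_true_eq]
    omega

lemma ports_eq (sparse : List (Int × Int)) (hnd : (sparse.map Prod.fst).Nodup) :
    poly_sparse_to_dense sparse = poly_sparse_to_dense_alt sparse := by
  unfold poly_sparse_to_dense poly_sparse_to_dense_alt
  cases hmax : PySem.List.max? (sparse.map Prod.fst) (fun x => x) with
  | none => rfl
  | some m =>
    simp only []
    rw [portA_eq_map]
    apply List.ext_getElem?
    intro j
    rw [scatter_getElem? sparse _ j hnd]
    cases hfind : sparse.find? (fun kv => decide (0 ≤ kv.1) && (kv.1.toNat == j)) with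
    | some kv =>
      have hpk := List.find?_some hfind
      simp only [Bool.and_eq_true, decide_eq_true_eq, beq_iff_eq] at hpk
      obtain ⟨h0, hj⟩ := hpk
      have hmem := List.mem_of_find?_eq_some hfind
      have hkj : kv.1 = (j : Int) := by omega
      have hin : pyKeyIn sparse (j : Int) = true := by
        simp only [pyKeyIn, List.contains_iff_mem, List.mem_map]
        exact ⟨kv, hmem, hkj⟩
      have hget : pyKeyGet sparse (j : Int) = kv.2 := by
        unfold pyKeyGet
        rw [pred_eq, hfind]
      by_cases hlt : j < (m + 1).toNat
      · simp [hlt, hin, hget]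
      · simp [hlt]
    | none =>
      have hnotmem : ((j : Int)) ∉ sparse.map Prod.fst := by
        rw [List.find?_eq_none] at hfind
        intro hmem
        obtain ⟨kv, hkv, hkj⟩ := List.mem_map.mp hmem
        have := hfind kv hkv
        simp only [Bool.and_eq_true, decide_eq_true_eq, beq_iff_eq, not_and] at this
        omega
      have hnin : pyKeyIn sparse (j : Int) = false := by
        simp [pyKeyIn, hnotmem]
      by_cases hlt : j < (m + 1).toNat
      · simp [hlt, hnin]
      · simp [hlt]

-- ===== VERDICT (by name: the statement is the Claim_ definition above) =====
theorem poly_sparse_to_dense_spec : Claim_equal_poly_sparse_to_dense := by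
  intro sparse _ hpre
  unfold Spec_poly_sparse_to_dense
  exact ports_eq sparse hpre.2
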